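-- pv_equiv track=rewrite | github.com/ajaydhungel7/fpl-agent | test_ft_calculation.py | calculate_free_transfers
-- ===== SOURCE A (Python) =====
-- def calculate_free_transfers(gameweeks_history, current_gw):
--     """
--     Test the free transfer calculation logic.
--
--     Args:
--         gameweeks_history: List of dicts with 'event' and 'event_transfers'
--         current_gw: Current gameweek number
--
--     Returns:
--         Number of free transfers available
--     """
--     free_transfers = 1  # Everyone gets 1 FT per week
--
--     # Look back through previous gameweeks
--     for gw_data in reversed(gameweeks_history):
--         if gw_data['event'] >= current_gw:
--             continue  # Skip current or future
--         if gw_data.get('event_transfers', 0) == 0: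
--             # No transfers made, bank one more (max 4)
--             free_transfers = min(free_transfers + 1, 4)
--         else:
--             # Transfers were made, stop counting
--             break
--
--     return free_transfers
-- ===== SOURCE B (Python) =====
-- def calculate_free_transfers(gameweeks_history, current_gw):
--     """Banked FTs = number of past gameweeks after the last one with transfers.
--
--     Builds the forward list of past-gameweek transfer counts, locates the index
--     of the last nonzero entry (-1 if none), and derives the banked count by
--     index arithmetic instead of a reversed break-loop.
--     """
--     past = [g.get('event_transfers', 0)
--             for g in gameweeks_history if g['event'] < current_gw]
--     cut = -1
--     for i, t in enumerate(past):
--         if t != 0: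
--             cut = i
--     banked = len(past) - 1 - cut
--     return min(1 + banked, 4)
-- ===== Notes on version B (the rewrite author's own statement) =====
-- stated objective: alternative
-- what changed: Instead of A's reversed break-loop with a per-step min-capped accumulator, B builds the forward list of past-gameweek transfer counts, finds the index of the last nonzero entry with one enumerate pass (no early exit), and computes the result by index arithmetic: min(1 + (len - 1 - lastNonzeroIndex), 4).
-- outside the precondition, e.g. on calculate_free_transfers([{}, {'event': 1, 'event_transfers': 1}], 2): A returns 1, B raises KeyError
import Mathlib
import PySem

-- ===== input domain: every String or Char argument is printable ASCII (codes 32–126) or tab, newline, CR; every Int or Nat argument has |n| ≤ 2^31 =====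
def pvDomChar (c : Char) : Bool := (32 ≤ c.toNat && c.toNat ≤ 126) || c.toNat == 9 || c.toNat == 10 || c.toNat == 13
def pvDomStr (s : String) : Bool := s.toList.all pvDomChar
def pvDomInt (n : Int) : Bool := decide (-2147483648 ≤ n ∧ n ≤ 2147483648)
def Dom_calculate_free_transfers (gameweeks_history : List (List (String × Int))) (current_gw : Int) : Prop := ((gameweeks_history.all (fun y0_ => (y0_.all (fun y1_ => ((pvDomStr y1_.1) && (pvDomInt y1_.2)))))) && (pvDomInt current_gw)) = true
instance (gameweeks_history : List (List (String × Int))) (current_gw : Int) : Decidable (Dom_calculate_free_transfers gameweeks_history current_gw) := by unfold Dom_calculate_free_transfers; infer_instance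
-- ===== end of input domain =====

-- B replaces A's reversed break-loop and per-step min-capped accumulator with a forward
-- filtered list of past transfer counts, a last-nonzero-index scan, and index arithmetic.


-- ===== PORT A =====
-- A's loop over reversed(gameweeks_history): skip (continue) if event >= current_gw,
-- bank min(ft+1, 4) on zero transfers, break otherwise.  gw_data['event'] raises KeyError
-- when the key is missing; Pre_ excludes that, the port returns a dummy 0 there.
def cftA_loop (l : List (List (String × Int))) (current_gw : Int) (ft : Int) : Int :=
  match l with
  | [] => ft
  | g :: rest =>
    match (PySem.Dict.mk g).get? "event" with
    | none => 0  -- KeyError in Python; unreachable under Pre_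
    | some e =>
      if e ≥ current_gw then cftA_loop rest current_gw ft
      else if (PySem.Dict.mk g).getD "event_transfers" 0 = 0 then
        cftA_loop rest current_gw (min (ft + 1) 4)
      else ft

def calculate_free_transfers (gameweeks_history : List (List (String × Int))) (current_gw : Int) : Int :=
  cftA_loop gameweeks_history.reverse current_gw 1

-- ===== PORT B =====
-- B's forward comprehension: transfer counts of past gameweeks; g['event'] raises KeyError
-- when missing, so the builder is Option-valued (none = KeyError; unreachable under Pre_).
def cftB_past (l : List (List (String × Int))) (current_gw : Int) : Option (List Int) :=
  match l with
  | [] => some []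
  | g :: rest =>
    match (PySem.Dict.mk g).get? "event" with
    | none => none
    | some e =>
      if e < current_gw then
        (cftB_past rest current_gw).map (fun p => (PySem.Dict.mk g).getD "event_transfers" 0 :: p)
      else cftB_past rest current_gw

-- B's enumerate loop: index of the last nonzero entry, -1 if none.
def cftB_cut (past : List Int) : Int :=
  (PySem.List.enumerate past 0).foldl (fun c p => if p.2 ≠ 0 then p.1 else c) (-1)

def calculate_free_transfers_alt (gameweeks_history : List (List (String × Int))) (current_gw : Int) : Int :=
  match cftB_past gameweeks_history current_gw with
  | none => 0  -- KeyError in Python; unreachable under Pre_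
  | some past => min (1 + ((past.length : Int) - 1 - cftB_cut past)) 4

-- ===== PRECONDITION & SPEC =====
-- Pre_ requires every gameweek dict to carry the 'event' key (the function's documented shape);
-- it also excludes some inputs on which A returns because its break fires before a keyless dict
-- is reached — there A's non-raising is accidental, and B raises KeyError.
def Pre_calculate_free_transfers (gameweeks_history : List (List (String × Int))) (current_gw : Int) : Prop :=
  ∀ g ∈ gameweeks_history, ((PySem.Dict.mk g).get? "event").isSome = true
instance (gameweeks_history : List (List (String × Int))) (current_gw : Int) : Decidable (Pre_calculate_free_transfers gameweeks_history current_gw) := by unfold Pre_calculate_free_transfers; infer_instance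
def pvWitness_calculate_free_transfers : (List (List (String × Int))) × Int :=
  ([[("event", 1), ("event_transfers", 0)], [("event", 2), ("event_transfers", 1)]], 3)
def Spec_calculate_free_transfers (gameweeks_history : List (List (String × Int))) (current_gw : Int) (out : Int) : Prop := out = calculate_free_transfers_alt gameweeks_history current_gw
instance (gameweeks_history : List (List (String × Int))) (current_gw : Int) (out : Int) : Decidable (Spec_calculate_free_transfers gameweeks_history current_gw out) := by unfold Spec_calculate_free_transfers; infer_instance

-- ===== CLAIM (what is proved, stated in full; the proofs are below) =====
def Claim_equal_calculate_free_transfers : Prop := ∀ (gameweeks_history : List (List (String × Int))) (current_gw : Int), Dom_calculate_free_transfers gameweeks_history current_gw → Pre_calculate_free_transfers gameweeks_history current_gw → Spec_calculate_free_transfers gameweeks_history current_gw (calculate_free_transfers gameweeks_history current_gw)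

-- ===== LEMMAS AND PROOFS =====
-- Leading-zero count of a list of Ints (proof-side characterisation shared by both ports).
def cftLZ : List Int → Int
  | [] => 0
  | t :: r => if t = 0 then 1 + cftLZ r else 0

-- Total (skip-on-missing-key) version of B's past list, for reasoning.
def cftPastT (l : List (List (String × Int))) (current_gw : Int) : List Int :=
  match l with
  | [] => []
  | g :: rest =>
    match (PySem.Dict.mk g).get? "event" with
    | none => cftPastT rest current_gw
    | some e =>
      if e < current_gw then (PySem.Dict.mk g).getD "event_transfers" 0 :: cftPastT rest current_gw
      else cftPastT rest current_gw

theorem cftLZ_nonneg (l : List Int) : 0 ≤ cftLZ l := by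
  induction l with
  | nil => simp [cftLZ]
  | cons t r ih => simp only [cftLZ]; split_ifs <;> omega

-- A's loop equals min(ft + leading zeros of the past list of its argument, 4).
theorem cftA_eq_min (l : List (List (String × Int))) (cgw ft : Int)
    (hp : ∀ g ∈ l, ((PySem.Dict.mk g).get? "event").isSome = true)
    (h1 : 1 ≤ ft) (h4 : ft ≤ 4) :
    cftA_loop l cgw ft = min (ft + cftLZ (cftPastT l cgw)) 4 := by
  induction l generalizing ft with
  | nil => simp [cftA_loop, cftPastT, cftLZ]; omega
  | cons g rest ih =>
    have hg := hp g (List.mem_cons_self ..)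
    have hrest : ∀ g ∈ rest, ((PySem.Dict.mk g).get? "event").isSome = true :=
      fun x hx => hp x (List.mem_cons_of_mem _ hx)
    simp only [cftA_loop, cftPastT]
    cases he : (PySem.Dict.mk g).get? "event" with
    | none => rw [he] at hg; simp at hg
    | some e =>
      dsimp only
      by_cases hge : e ≥ cgw
      · have : ¬ e < cgw := by omega
        simp only [if_pos hge, if_neg this]
        exact ih ft hrest h1 h4
      · have hlt : e < cgw := by omega
        simp only [if_neg hge, if_pos hlt, cftLZ]
        by_cases hz : (PySem.Dict.mk g).getD "event_transfers" 0 = 0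
        · simp only [if_pos hz]
          have hc := cftLZ_nonneg (cftPastT rest cgw)
          rw [ih (min (ft + 1) 4) hrest (by omega) (by omega)]
          omega
        · simp only [if_neg hz]
          omega

theorem cftPastT_append (a b : List (List (String × Int))) (cgw : Int) :
    cftPastT (a ++ b) cgw = cftPastT a cgw ++ cftPastT b cgw := by
  induction a with
  | nil => simp [cftPastT]
  | cons g rest ih =>
    simp only [List.cons_append, cftPastT]
    cases (PySem.Dict.mk g).get? "event" with
    | none => exact ih
    | some e => dsimp only; split_ifs <;> simp [ih]

theorem cftPastT_reverse (l : List (List (String × Int))) (cgw : Int) :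
    cftPastT l.reverse cgw = (cftPastT l cgw).reverse := by
  induction l with
  | nil => simp [cftPastT]
  | cons g rest ih =>
    simp only [List.reverse_cons, cftPastT_append, ih, cftPastT]
    cases (PySem.Dict.mk g).get? "event" with
    | none => simp
    | some e => dsimp only; split_ifs <;> simp

-- Under Pre_, B's Option-valued comprehension is the total past list.
theorem cftB_past_eq (l : List (List (String × Int))) (cgw : Int)
    (hp : ∀ g ∈ l, ((PySem.Dict.mk g).get? "event").isSome = true) :
    cftB_past l cgw = some (cftPastT l cgw) := by
  induction l with
  | nil => simp [cftB_past, cftPastT]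
  | cons g rest ih =>
    have hg := hp g (List.mem_cons_self ..)
    have hrest := fun x hx => hp x (List.mem_cons_of_mem _ hx)
    simp only [cftB_past, cftPastT]
    cases he : (PySem.Dict.mk g).get? "event" with
    | none => rw [he] at hg; simp at hg
    | some e => dsimp only; split_ifs <;> simp [ih hrest]

-- The key index-arithmetic fact: len - 1 - (last nonzero index) = trailing-zero count.
theorem cftB_cut_append (xs : List Int) (t : Int) :
    cftB_cut (xs ++ [t]) = if t ≠ 0 then (xs.length : Int) else cftB_cut xs := by
  simp only [cftB_cut, PySem.List.enumerate_append, List.foldl_append,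
    PySem.List.enumerate_cons, PySem.List.enumerate_nil, List.foldl_cons, List.foldl_nil]
  split_ifs <;> simp

theorem cftB_cut_eq (past : List Int) :
    (past.length : Int) - 1 - cftB_cut past = cftLZ past.reverse := by
  induction past using List.reverseRecOn with
  | nil => simp [cftB_cut, PySem.List.enumerate_nil, cftLZ]
  | append_singleton xs t ih =>
    rw [cftB_cut_append]
    simp only [List.reverse_append, List.reverse_cons, List.reverse_nil, List.nil_append,
      List.singleton_append, cftLZ, List.length_append, List.length_cons, List.length_nil]
    by_cases ht : t = 0
    · simp only [ht, ne_eq, not_true_eq_false, if_false]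
      push_cast; omega
    · simp only [if_pos ht, if_neg ht]
      push_cast; omega

-- ===== VERDICT (by name: the statement is the Claim_ definition above) =====
theorem calculate_free_transfers_spec : Claim_equal_calculate_free_transfers := by
  intro l cgw _ hp
  unfold Spec_calculate_free_transfers calculate_free_transfers calculate_free_transfers_alt
  rw [cftB_past_eq l cgw hp]
  rw [cftA_eq_min l.reverse cgw 1 (fun g hg => hp g (List.mem_reverse.mp hg)) le_rfl (by norm_num)]
  rw [cftPastT_reverse, ← cftB_cut_eq (cftPastT l cgw)]
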